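-- pv_equiv track=rewrite | github.com/Creator-club-ai/richeese.agent | .agent/skills/richesse-source-intake/scripts/analyze_youtube.py | matching_language_keys
-- ===== SOURCE A (Python) =====
-- def matching_language_keys(keys: list[str], preferred: str) -> list[str]:
--     preferred = preferred.lower()
--     exact = []
--     prefix = []
--     for key in keys:
--         lowered = key.lower()
--         if lowered in {"live_chat", "comments"}:
--             continue
--         if lowered == preferred:
--             exact.append(key)
--         elif lowered.startswith(preferred + "-") or lowered.startswith(preferred + "_"):
--             prefix.append(key)
--     return exact + prefix
-- ===== SOURCE B (Python) =====
-- def matching_language_keys(keys: list[str], preferred: str) -> list[str]: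
--     preferred = preferred.lower()
--
--     def rank(key):
--         lowered = key.lower()
--         if lowered in ("live_chat", "comments"):
--             return None
--         if lowered == preferred:
--             return 0
--         if lowered.startswith(preferred + "-") or lowered.startswith(preferred + "_"):
--             return 1
--         return None
--
--     kept = [(r, k) for k in keys if (r := rank(k)) is not None]
--     return [k for _, k in sorted(kept, key=lambda t: t[0])]
-- ===== Notes on version B (the rewrite author's own statement) =====
-- stated objective: alternative
-- what changed: Replaces the two-accumulator loop with a decorate-filter-stable-sort pipeline: each key is tagged with a rank (0 exact, 1 prefix, dropped otherwise) and a single stable sort on the rank produces the exact-then-prefix ordering.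
import Mathlib
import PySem

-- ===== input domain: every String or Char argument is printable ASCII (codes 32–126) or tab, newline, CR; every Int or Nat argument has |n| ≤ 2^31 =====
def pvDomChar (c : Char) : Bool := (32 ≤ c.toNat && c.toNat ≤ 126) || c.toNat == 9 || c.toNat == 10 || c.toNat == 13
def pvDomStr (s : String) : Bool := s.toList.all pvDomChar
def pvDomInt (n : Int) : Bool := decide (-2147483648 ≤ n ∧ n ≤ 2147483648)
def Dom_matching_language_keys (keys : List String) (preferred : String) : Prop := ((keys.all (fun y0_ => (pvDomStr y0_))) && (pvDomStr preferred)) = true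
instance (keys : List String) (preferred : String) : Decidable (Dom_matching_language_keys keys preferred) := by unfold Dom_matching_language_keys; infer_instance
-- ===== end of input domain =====

-- B replaces A's two-accumulator loop with a decorate-filter-stable-sort pipeline
-- (tag each kept key with rank 0/1, stable-sort on the rank); objective: alternative, same observable result.


-- ===== PORT A =====
-- one pass over keys, maintaining the two accumulators (exact, prefix), concatenated at the end
def mlkStep (pref : String) (st : List String × List String) (key : String) :
    List String × List String :=
  let lowered := PySem.Str.lower key
  if lowered == "live_chat" || lowered == "comments" then st
  else if lowered == pref then (st.1 ++ [key], st.2)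
  else if PySem.Str.startswith lowered (pref ++ "-") || PySem.Str.startswith lowered (pref ++ "_") then
    (st.1, st.2 ++ [key])
  else st

def matching_language_keys (keys : List String) (preferred : String) : List String :=
  let pref := PySem.Str.lower preferred
  let r := keys.foldl (mlkStep pref) ([], [])
  r.1 ++ r.2

-- ===== PORT B =====
-- rank: None = dropped, 0 = exact match, 1 = prefix match
def mlkRank (pref : String) (key : String) : Option Int :=
  let lowered := PySem.Str.lower key
  if lowered == "live_chat" || lowered == "comments" then none
  else if lowered == pref then some 0
  else if PySem.Str.startswith lowered (pref ++ "-") || PySem.Str.startswith lowered (pref ++ "_") then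
    some 1
  else none

def matching_language_keys_alt (keys : List String) (preferred : String) : List String :=
  let pref := PySem.Str.lower preferred
  let kept := keys.filterMap (fun k => (mlkRank pref k).map (fun r => (r, k)))
  (PySem.List.sorted kept (fun t => t.1) false).map (fun t => t.2)

-- ===== PRECONDITION & SPEC =====
def Spec_matching_language_keys (keys : List String) (preferred : String) (out : List String) : Prop := out = matching_language_keys_alt keys preferred
instance (keys : List String) (preferred : String) (out : List String) : Decidable (Spec_matching_language_keys keys preferred out) := by unfold Spec_matching_language_keys; infer_instance

-- ===== CLAIM =====
def Claim_equal_matching_language_keys : Prop := ∀ (keys : List String) (preferred : String), Dom_matching_language_keys keys preferred → Spec_matching_language_keys keys preferred (matching_language_keys keys preferred)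

-- ===== LEMMAS AND PROOFS =====

-- the insertion order used by sorted with key = fst on Int × String
def mlkBefore (a b : Int × String) : Bool := decide (a.1 < b.1)

-- inserting a rank-0 element into zeros ++ ones puts it right after the zeros
theorem insertBy_zero (x : Int × String) (hx : x.1 = 0)
    (zs os : List (Int × String)) (hz : ∀ z ∈ zs, z.1 = 0) (ho : ∀ o ∈ os, o.1 = 1) :
    PySem.List.insertBy mlkBefore x (zs ++ os) = zs ++ x :: os := by
  induction zs with
  | nil =>
    cases os with
    | nil => simp [PySem.List.insertBy]
    | cons o t =>
      have h1 : o.1 = 1 := ho o (by simp)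
      simp [PySem.List.insertBy, mlkBefore, hx, h1]
  | cons z zt ih =>
    have hz0 : z.1 = 0 := hz z (by simp)
    have : mlkBefore x z = false := by simp [mlkBefore, hx, hz0]
    simp only [List.cons_append, PySem.List.insertBy, this]
    simp [ih (fun a ha => hz a (by simp [ha]))]

-- inserting a rank-1 element into zeros ++ ones appends it at the end
theorem insertBy_one (x : Int × String) (hx : x.1 = 1)
    (zs os : List (Int × String)) (hz : ∀ z ∈ zs, z.1 = 0) (ho : ∀ o ∈ os, o.1 = 1) :
    PySem.List.insertBy mlkBefore x (zs ++ os) = (zs ++ os) ++ [x] := by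
  apply PySem.List.insertBy_of_forall_not_before
  intro y hy
  rcases List.mem_append.mp hy with h | h
  · simp [mlkBefore, hx, hz y h]
  · simp [mlkBefore, hx, ho y h]

-- stable insertion sort on a 0/1-ranked list is filter-0 ++ filter-1
theorem foldl_insertBy_01 (xs zs os : List (Int × String))
    (hxs : ∀ t ∈ xs, t.1 = 0 ∨ t.1 = 1)
    (hz : ∀ z ∈ zs, z.1 = 0) (ho : ∀ o ∈ os, o.1 = 1) :
    xs.foldl (fun acc x => PySem.List.insertBy mlkBefore x acc) (zs ++ os) =
      (zs ++ xs.filter (fun t => t.1 == 0)) ++ (os ++ xs.filter (fun t => t.1 == 1)) := by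
  induction xs generalizing zs os with
  | nil => simp
  | cons x xt ih =>
    rcases hxs x (by simp) with h0 | h1
    · rw [List.foldl_cons, insertBy_zero x h0 zs os hz ho,
        show zs ++ x :: os = (zs ++ [x]) ++ os by simp,
        ih (zs ++ [x]) os (fun t ht => hxs t (by simp [ht]))
          (by intro z hz'; rcases List.mem_append.mp hz' with h | h
              · exact hz z h
              · simp at h; simp [h, h0]) ho]
      simp [List.filter_cons, h0]
    · rw [List.foldl_cons, insertBy_one x h1 zs os hz ho,
        show (zs ++ os) ++ [x] = zs ++ (os ++ [x]) by simp,
        ih zs (os ++ [x]) (fun t ht => hxs t (by simp [ht])) hz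
          (by intro o ho'; rcases List.mem_append.mp ho' with h | h
              · exact ho o h
              · simp at h; simp [h, h1])]
      simp [List.filter_cons, h1]

-- every ranked value mlkRank produces is 0 or 1
theorem mlkRank_01 (pref k : String) :
    mlkRank pref k = none ∨ mlkRank pref k = some 0 ∨ mlkRank pref k = some 1 := by
  simp only [mlkRank]
  split_ifs <;> simp

theorem mem_kept_rank (pref : String) (keys : List String) :
    ∀ t ∈ keys.filterMap (fun k => (mlkRank pref k).map (fun r => (r, k))), t.1 = 0 ∨ t.1 = 1 := by
  intro t ht
  simp only [List.mem_filterMap, Option.map_eq_some_iff] at ht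
  obtain ⟨k, -, r, hr, rfl⟩ := ht
  rcases mlkRank_01 pref k with h | h | h <;> rw [hr] at h <;> simp_all

-- the kept (rank, key) pairs, split by rank, are exactly A's two filters
theorem filterMap_rank_split (pref : String) (keys : List String) :
    (keys.filterMap (fun k => (mlkRank pref k).map (fun r => (r, k)))).filter (fun t => t.1 == 0) =
      (keys.filter (fun k => mlkRank pref k == some 0)).map (fun k => ((0 : Int), k)) ∧
    (keys.filterMap (fun k => (mlkRank pref k).map (fun r => (r, k)))).filter (fun t => t.1 == 1) =
      (keys.filter (fun k => mlkRank pref k == some 1)).map (fun k => ((1 : Int), k)) := by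
  induction keys with
  | nil => simp
  | cons k kt ih =>
    obtain ⟨ih1, ih2⟩ := ih
    rcases mlkRank_01 pref k with h | h | h <;>
      refine ⟨?_, ?_⟩ <;>
      simp_all [List.filterMap_cons, List.filter_cons]

-- A's fold equals the two filters, in rank form
theorem mlk_foldl_eq (pref : String) (keys : List String) (e p : List String) :
    keys.foldl (mlkStep pref) (e, p) =
      (e ++ keys.filter (fun k => mlkRank pref k == some 0),
       p ++ keys.filter (fun k => mlkRank pref k == some 1)) := by
  induction keys generalizing e p with
  | nil => simp
  | cons k kt ih =>
    simp only [List.foldl_cons, List.filter_cons]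
    have hstep : mlkStep pref (e, p) k =
        (if mlkRank pref k == some 0 then (e ++ [k], p)
         else if mlkRank pref k == some 1 then (e, p ++ [k]) else (e, p)) := by
      unfold mlkStep mlkRank
      split_ifs with h <;> (try simp_all) <;> (rw [← h.2]; exact h.1)
    rw [hstep]
    split_ifs with h0 h1 <;> rw [ih] <;> simp_all

-- ===== VERDICT =====
theorem matching_language_keys_spec : Claim_equal_matching_language_keys := by
  intro keys preferred _
  unfold Spec_matching_language_keys matching_language_keys matching_language_keys_alt
  simp only []
  set pref := PySem.Str.lower preferred with hpref
  obtain ⟨h0, h1⟩ := filterMap_rank_split pref keys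
  have h01 := mem_kept_rank pref keys
  rw [mlk_foldl_eq pref keys [] []]
  rw [PySem.List.sorted_eq_foldl_insertBy]
  have := foldl_insertBy_01 (keys.filterMap (fun k => (mlkRank pref k).map (fun r => (r, k)))) [] [] h01 (by simp) (by simp)
  simp only [List.nil_append, List.append_nil] at this ⊢
  rw [show (fun acc x => PySem.List.insertBy (fun a b => decide (a.1 < b.1)) x acc)
      = (fun acc x => PySem.List.insertBy mlkBefore x acc) from rfl, this, h0, h1]
  simp
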